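-- pv_equiv track=rewrite | github.com/digifella/Cortex | docker/cortex_engine/citation_formatter.py | build_reference_index
-- ===== SOURCE A (Python) =====
-- from typing import Dict, List, Tuple
--
-- def build_reference_index(claim_map_result: Dict) -> Tuple[Dict[str, int], List[str]]:
--     """
--     Build a stable numeric reference index for sources present in evidence.
--     Returns mapping and ordered reference labels.
--     """
--     refs: Dict[str, int] = {}
--     ordered: List[str] = []
--     for claim in claim_map_result.get("claims", []):
--         for ev in claim.get("evidence", []):
--             label = (ev.get("source_file") or ev.get("doc_id") or "source").strip()
--             if label and label not in refs:
--                 refs[label] = len(refs) + 1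
--                 ordered.append(label)
--     return refs, ordered
-- ===== SOURCE B (Python) =====
-- def _label(ev):
--     return (ev.get("source_file") or ev.get("doc_id") or "source").strip()
--
--
-- def _dedup(xs):
--     # recursive sieve: keep the head, strip every later copy of it, recurse on the rest;
--     # no seen-set / index dict is maintained
--     if not xs:
--         return []
--     head = xs[0]
--     return [head] + _dedup([x for x in xs[1:] if x != head])
--
--
-- def build_reference_index(claim_map_result):
--     labels = [_label(ev)
--               for claim in claim_map_result.get("claims", [])
--               for ev in claim.get("evidence", [])]
--     labels = [l for l in labels if l]
--     ordered = _dedup(labels)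
--     refs = {x: i + 1 for i, x in enumerate(ordered)}
--     return refs, ordered
-- ===== Notes on version B (the rewrite author's own statement) =====
-- stated objective: alternative
-- what changed: Replaces A's single lockstep loop that grows a seen-dict and the ordered list together (inline membership test against the accumulator) by flattening all labels and deduplicating them with a recursive sieve (keep the head, filter out its later copies, recurse) that maintains no auxiliary structure, then deriving the 1-based index afterwards with enumerate.
import Mathlib
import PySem

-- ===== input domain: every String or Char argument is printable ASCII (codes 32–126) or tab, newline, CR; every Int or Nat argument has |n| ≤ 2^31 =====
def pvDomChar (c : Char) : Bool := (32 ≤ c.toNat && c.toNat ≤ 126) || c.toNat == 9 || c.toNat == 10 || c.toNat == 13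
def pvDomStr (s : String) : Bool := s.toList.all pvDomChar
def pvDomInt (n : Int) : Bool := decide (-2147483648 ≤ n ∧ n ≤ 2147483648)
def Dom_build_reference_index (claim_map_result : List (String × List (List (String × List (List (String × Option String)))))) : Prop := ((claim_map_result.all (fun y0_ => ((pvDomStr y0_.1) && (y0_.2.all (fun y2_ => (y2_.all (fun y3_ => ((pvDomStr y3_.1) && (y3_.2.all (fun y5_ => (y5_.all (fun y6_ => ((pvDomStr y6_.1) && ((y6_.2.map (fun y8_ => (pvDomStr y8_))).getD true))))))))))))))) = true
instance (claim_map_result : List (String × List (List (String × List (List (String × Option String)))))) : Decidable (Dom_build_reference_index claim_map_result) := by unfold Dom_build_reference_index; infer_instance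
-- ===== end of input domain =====

-- B replaces A's lockstep seen-dict loop by a recursive sieve dedup (keep head, filter
-- out its later copies, recurse) over the flattened labels, indexing afterwards.


-- shared extraction: (ev.get("source_file") or ev.get("doc_id") or "source").strip()
-- Python `x or y` yields y exactly when x is None or the empty string.
def pvTruthyOr (a : Option String) (b : String) : String :=
  match a with
  | some s => if s = "" then b else s
  | none => b

def pvLabel (ev : List (String × Option String)) : String :=
  PySem.Str.strip
    (pvTruthyOr ((PySem.Dict.mk ev).get? "source_file").join
      (pvTruthyOr ((PySem.Dict.mk ev).get? "doc_id").join "source"))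

-- ===== PORT A =====
def build_reference_index (claim_map_result : List (String × List (List (String × List (List (String × Option String)))))) : (List (String × Int)) × List String :=
  let st :=
    ((PySem.Dict.mk claim_map_result).getD "claims" []).foldl
      (fun st claim =>
        ((PySem.Dict.mk claim).getD "evidence" []).foldl
          (fun (st : PySem.Dict String Int × List String) ev =>
            let label := pvLabel ev
            if label ≠ "" ∧ st.1.contains label = false then
              (st.1.insert label ((st.1.size : Int) + 1), st.2 ++ [label])
            else st)
          st)
      (PySem.Dict.mk [], [])
  (st.1.items, st.2)

-- ===== PORT B =====
-- _dedup: recursive sieve (keep head, drop its later copies, recurse)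
def pvSieve : List String → List String
  | [] => []
  | x :: xs => x :: pvSieve (xs.filter (fun y => y ≠ x))
termination_by xs => xs.length
decreasing_by
  simp only [List.length_unattach, List.length_cons]
  exact Nat.lt_succ_of_le ((List.length_filter_le _ _).trans (Nat.le_of_eq List.length_attach))

def build_reference_index_alt (claim_map_result : List (String × List (List (String × List (List (String × Option String)))))) : (List (String × Int)) × List String :=
  let labels :=
    ((PySem.Dict.mk claim_map_result).getD "claims" []).flatMap
      (fun claim => ((PySem.Dict.mk claim).getD "evidence" []).map pvLabel)
  let keep := labels.filter (fun l => l ≠ "")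
  let ordered := pvSieve keep
  ((PySem.List.enumerate ordered).map (fun p => (p.2, (p.1 : Int) + 1)), ordered)

-- ===== PRECONDITION & SPEC =====
def Spec_build_reference_index (claim_map_result : List (String × List (List (String × List (List (String × Option String)))))) (out : (List (String × Int)) × List String) : Prop := out = build_reference_index_alt claim_map_result
instance (claim_map_result : List (String × List (List (String × List (List (String × Option String)))))) (out : (List (String × Int)) × List String) : Decidable (Spec_build_reference_index claim_map_result out) := by unfold Spec_build_reference_index; infer_instance

-- ===== CLAIM (what is proved, stated in full; the proofs are below) =====
def Claim_equal_build_reference_index : Prop := ∀ (claim_map_result : List (String × List (List (String × List (List (String × Option String)))))), Dom_build_reference_index claim_map_result → Spec_build_reference_index claim_map_result (build_reference_index claim_map_result)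

-- ===== LEMMAS AND PROOFS =====

-- the numeric index B derives from an ordered label list
def pvNum (o : List String) : List (String × Int) :=
  (PySem.List.enumerate o).map (fun p => (p.2, (p.1 : Int) + 1))

-- A's loop step on the (refs, ordered) state
def pvStepA (st : PySem.Dict String Int × List String) (label : String) :
    PySem.Dict String Int × List String :=
  if label ≠ "" ∧ st.1.contains label = false then
    (st.1.insert label ((st.1.size : Int) + 1), st.2 ++ [label])
  else st

-- B's dedup step on the ordered list alone
def pvStepO (o : List String) (label : String) : List String :=
  if label = "" then o else PySem.Set.add o label

lemma pvNum_append (o : List String) (l : String) :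
    pvNum (o ++ [l]) = pvNum o ++ [(l, (o.length : Int) + 1)] := by
  simp [pvNum, PySem.List.enumerate_append, PySem.List.enumerate_cons]

lemma any_enum_snd (o : List String) (l : String) :
    ∀ s, ((PySem.List.enumerate o s).any fun p => p.2 == l) = decide (l ∈ o) := by
  induction o with
  | nil => intro s; simp [PySem.List.enumerate_nil]
  | cons x xs ih =>
    intro s
    simp only [PySem.List.enumerate_cons, List.any_cons, ih, List.mem_cons]
    rcases eq_or_ne l x with h | h
    · simp [h]
    · simp [h, Ne.symm h]

lemma contains_pvNum (o : List String) (l : String) :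
    (PySem.Dict.mk (pvNum o)).contains l = decide (l ∈ o) := by
  simp only [PySem.Dict.contains, pvNum, List.any_map]
  simpa using any_enum_snd o l 0

lemma size_pvNum (o : List String) :
    (PySem.Dict.mk (pvNum o)).size = o.length := by
  simp [pvNum, PySem.Dict.size, PySem.List.length_enumerate]

lemma pvStepA_pvNum (o : List String) (l : String) :
    pvStepA (PySem.Dict.mk (pvNum o), o) l
      = (PySem.Dict.mk (pvNum (pvStepO o l)), pvStepO o l) := by
  by_cases h0 : l = ""
  · simp [pvStepA, pvStepO, h0]
  · by_cases hm : l ∈ o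
    · have hc : (PySem.Dict.mk (pvNum o)).contains l = true := by
        rw [contains_pvNum]; simpa using hm
      simp only [pvStepA, hc, Bool.true_eq_false, and_false, if_false]
      simp [pvStepO, h0, PySem.Set.add, hm]
    · have hc : (PySem.Dict.mk (pvNum o)).contains l = false := by
        rw [contains_pvNum]; simpa using hm
      have hins : (PySem.Dict.mk (pvNum o)).insert l (((PySem.Dict.mk (pvNum o)).size : Int) + 1)
          = PySem.Dict.mk (pvNum (o ++ [l])) := by
        simp only [PySem.Dict.insert, hc, Bool.false_eq_true, if_false, size_pvNum, pvNum_append]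
      simp only [pvStepA, hc, ne_eq, h0, not_false_iff, and_self, if_true, hins]
      simp [pvStepO, h0, PySem.Set.add, hm]

lemma foldl_pvStepA (ls : List String) (o : List String) :
    ls.foldl pvStepA (PySem.Dict.mk (pvNum o), o)
      = (PySem.Dict.mk (pvNum (ls.foldl pvStepO o)), ls.foldl pvStepO o) := by
  induction ls generalizing o with
  | nil => rfl
  | cons l ls ih => simp only [List.foldl_cons, pvStepA_pvNum, ih]

lemma foldl_add_filter (ls : List String) :
    ∀ init : List String,
      (ls.filter (fun l => l ≠ "")).foldl PySem.Set.add init = ls.foldl pvStepO init := by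
  induction ls with
  | nil => intro init; rfl
  | cons x xs ih =>
    intro init
    by_cases h0 : x = ""
    · rw [List.filter_cons_of_neg (by simp [h0]), List.foldl_cons]
      simpa [pvStepO, h0] using ih init
    · rw [List.filter_cons_of_pos (by simp [h0]), List.foldl_cons, List.foldl_cons]
      simpa [pvStepO, h0] using ih (PySem.Set.add init x)

-- adding onto a state that already starts with a: a stays in front, later copies of a are no-ops
lemma foldl_add_cons (a : String) :
    ∀ (xs acc : List String),
      xs.foldl PySem.Set.add (a :: acc)
        = a :: (xs.filter (fun y => y ≠ a)).foldl PySem.Set.add acc := by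
  intro xs
  induction xs with
  | nil => intro acc; rfl
  | cons y xs ih =>
    intro acc
    by_cases hy : y = a
    · subst hy
      rw [List.filter_cons_of_neg (by simp), List.foldl_cons]
      have : PySem.Set.add (y :: acc) y = y :: acc := by
        simp [PySem.Set.add, PySem.Set.contains]
      rw [this, ih]
    · rw [List.filter_cons_of_pos (by simp [hy]), List.foldl_cons, List.foldl_cons]
      have : PySem.Set.add (a :: acc) y = a :: PySem.Set.add acc y := by
        by_cases hm : y ∈ acc
        · simp [PySem.Set.add, PySem.Set.contains, hm, hy]
        · simp [PySem.Set.add, PySem.Set.contains, hm, hy]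
      rw [this, ih]

-- the recursive sieve computes exactly the first-occurrence dedup
lemma pvSieve_eq_foldl_add (xs : List String) :
    pvSieve xs = xs.foldl PySem.Set.add [] := by
  generalize h : xs.length = n
  induction n using Nat.strong_induction_on generalizing xs with
  | _ n ih =>
    cases xs with
    | nil => rw [pvSieve.eq_1]; rfl
    | cons x xs =>
      have hlt : (xs.filter (fun y => y ≠ x)).length < n := by
        subst h
        simp only [List.length_cons]
        exact Nat.lt_succ_of_le (List.length_filter_le _ _)
      rw [pvSieve.eq_2, ih _ hlt _ rfl, List.foldl_cons]
      have h0 : PySem.Set.add ([] : List String) x = [x] := rfl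
      rw [h0, foldl_add_cons]

lemma foldl_flat (cs : List (List (String × List (List (String × Option String))))) :
    ∀ init : PySem.Dict String Int × List String,
      cs.foldl (fun st claim =>
          ((((PySem.Dict.mk claim).getD "evidence" []).map pvLabel).foldl pvStepA st)) init
        = (cs.flatMap (fun claim => ((PySem.Dict.mk claim).getD "evidence" []).map pvLabel)).foldl
            pvStepA init := by
  induction cs with
  | nil => intro init; rfl
  | cons c cs ih =>
    intro init
    simp only [List.foldl_cons, List.flatMap_cons, List.foldl_append, ih]

-- ===== VERDICT (by name: the statement is the Claim_ definition above) =====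
theorem build_reference_index_spec : Claim_equal_build_reference_index := by
  intro cm _
  unfold Spec_build_reference_index build_reference_index build_reference_index_alt
  have hinner : ∀ (claim : List (String × List (List (String × Option String))))
      (st : PySem.Dict String Int × List String),
      ((PySem.Dict.mk claim).getD "evidence" []).foldl
        (fun (st : PySem.Dict String Int × List String) ev =>
          let label := pvLabel ev
          if label ≠ "" ∧ st.1.contains label = false then
            (st.1.insert label ((st.1.size : Int) + 1), st.2 ++ [label])
          else st)
        st
      = (((PySem.Dict.mk claim).getD "evidence" []).map pvLabel).foldl pvStepA st := by
    intro claim st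
    rw [List.foldl_map]
    rfl
  have hnest :
      ((PySem.Dict.mk cm).getD "claims" []).foldl
        (fun st claim =>
          ((PySem.Dict.mk claim).getD "evidence" []).foldl
            (fun (st : PySem.Dict String Int × List String) ev =>
              let label := pvLabel ev
              if label ≠ "" ∧ st.1.contains label = false then
                (st.1.insert label ((st.1.size : Int) + 1), st.2 ++ [label])
              else st)
            st)
        (PySem.Dict.mk [], [])
      = (((PySem.Dict.mk cm).getD "claims" []).flatMap
          (fun claim => ((PySem.Dict.mk claim).getD "evidence" []).map pvLabel)).foldl
          pvStepA (PySem.Dict.mk [], []) := by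
    simp only [hinner]
    exact foldl_flat _ _
  rw [hnest]
  have h0 : (PySem.Dict.mk ([] : List (String × Int)), ([] : List String))
      = (PySem.Dict.mk (pvNum []), ([] : List String)) := rfl
  rw [h0, foldl_pvStepA]
  simp only [pvSieve_eq_foldl_add, foldl_add_filter]
  rfl
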